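-- pv_equiv track=rewrite | github.com/editoriaI/victor | bot/embeds.py | _verify_fix_tips
-- ===== SOURCE A (Python) =====
-- from typing import List, Optional
--
-- def _verify_fix_tips(missing_labels: List[str], highrise_username: str) -> str:
--     tips: List[str] = []
--     if "USERNAME" in missing_labels:
--         tips.append(f"Add `{highrise_username}` exactly as written.")
--     tag_labels = [label for label in missing_labels if label.startswith("#")]
--     if tag_labels:
--         tips.append("Add the required tags to the bio.")
--     if "BIO_TOO_SHORT" in missing_labels:
--         tips.append("Write a fuller bio so it clears the minimum length.")
--     if "BIO_TOO_LONG" in missing_labels: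
--         tips.append("Trim the bio down before resubmitting.")
--     forbidden_labels = [label for label in missing_labels if label.startswith("FORBIDDEN:")]
--     if forbidden_labels:
--         tips.append("Remove blocked wording or patterns.")
--
--     other_patterns = [
--         label
--         for label in missing_labels
--         if label not in {"BIO_TOO_SHORT", "BIO_TOO_LONG", "USERNAME"}
--         and not label.startswith("#")
--         and not label.startswith("FORBIDDEN:")
--     ]
--     if other_patterns:
--         tips.append("Match the required formatting pattern for this server.")
--
--     if not tips:
--         tips.append("Double-check the bio text and try the command again.")
--
--     return "\n".join(f"- {tip}" for tip in tips[:4])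
-- ===== SOURCE B (Python) =====
-- from typing import List
--
-- def _verify_fix_tips(missing_labels: List[str], highrise_username: str) -> str:
--     has_user = has_tag = has_short = has_long = has_forb = has_other = False
--     for label in missing_labels:
--         if label == "USERNAME":
--             has_user = True
--         elif label.startswith("#"):
--             has_tag = True
--         elif label == "BIO_TOO_SHORT":
--             has_short = True
--         elif label == "BIO_TOO_LONG":
--             has_long = True
--         elif label.startswith("FORBIDDEN:"):
--             has_forb = True
--         else:
--             has_other = True
--     tips: List[str] = []
--     if has_user:
--         tips.append(f"Add `{highrise_username}` exactly as written.")
--     if has_tag: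
--         tips.append("Add the required tags to the bio.")
--     if has_short:
--         tips.append("Write a fuller bio so it clears the minimum length.")
--     if has_long:
--         tips.append("Trim the bio down before resubmitting.")
--     if has_forb:
--         tips.append("Remove blocked wording or patterns.")
--     if has_other:
--         tips.append("Match the required formatting pattern for this server.")
--     if not tips:
--         tips.append("Double-check the bio text and try the command again.")
--     return "\n".join("- " + tip for tip in tips[:4])
-- ===== Notes on version B (the rewrite author's own statement) =====
-- stated objective: faster
-- what changed: Replaces A's six separate scans of missing_labels (two membership tests, two filter comprehensions, a set-exclusion comprehension) by one classifying pass that sets six boolean flags via an if/elif chain, then builds the tips list from the flags in the same fixed order.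
import Mathlib
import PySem

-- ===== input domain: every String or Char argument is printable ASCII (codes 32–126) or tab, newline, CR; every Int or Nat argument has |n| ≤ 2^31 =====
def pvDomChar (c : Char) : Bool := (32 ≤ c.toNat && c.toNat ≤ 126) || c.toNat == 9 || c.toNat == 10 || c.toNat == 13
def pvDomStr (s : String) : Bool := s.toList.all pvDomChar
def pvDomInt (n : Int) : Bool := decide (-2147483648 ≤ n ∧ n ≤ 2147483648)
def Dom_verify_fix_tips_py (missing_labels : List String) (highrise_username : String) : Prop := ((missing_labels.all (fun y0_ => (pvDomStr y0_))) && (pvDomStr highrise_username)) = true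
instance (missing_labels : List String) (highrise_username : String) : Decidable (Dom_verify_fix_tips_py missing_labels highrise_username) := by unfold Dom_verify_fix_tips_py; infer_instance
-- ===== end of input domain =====

-- B replaces A's six separate scans of the label list by one classifying pass
-- setting six boolean flags, then builds the same tips in the same fixed order (objective: alternative).

-- ===== PORT A =====
def verify_fix_tips_py (missing_labels : List String) (highrise_username : String) : String :=
  let tips : List String := []
  let tips := if missing_labels.contains "USERNAME" then
      tips ++ ["Add `" ++ highrise_username ++ "` exactly as written."] else tips
  let tag_labels := missing_labels.filter (fun label => PySem.Str.startswith label "#")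
  let tips := if !tag_labels.isEmpty then tips ++ ["Add the required tags to the bio."] else tips
  let tips := if missing_labels.contains "BIO_TOO_SHORT" then
      tips ++ ["Write a fuller bio so it clears the minimum length."] else tips
  let tips := if missing_labels.contains "BIO_TOO_LONG" then
      tips ++ ["Trim the bio down before resubmitting."] else tips
  let forbidden_labels := missing_labels.filter (fun label => PySem.Str.startswith label "FORBIDDEN:")
  let tips := if !forbidden_labels.isEmpty then tips ++ ["Remove blocked wording or patterns."] else tips
  let other_patterns := missing_labels.filter (fun label =>
      !(label == "BIO_TOO_SHORT" || label == "BIO_TOO_LONG" || label == "USERNAME")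
      && !PySem.Str.startswith label "#" && !PySem.Str.startswith label "FORBIDDEN:")
  let tips := if !other_patterns.isEmpty then
      tips ++ ["Match the required formatting pattern for this server."] else tips
  let tips := if tips.isEmpty then tips ++ ["Double-check the bio text and try the command again."] else tips
  PySem.Str.join "\n" ((tips.take 4).map (fun tip => "- " ++ tip))

-- ===== PORT B =====
-- one classifying pass: the if/elif chain of Source B's loop body
def pvClassify (st : Bool × Bool × Bool × Bool × Bool × Bool) (label : String) :
    Bool × Bool × Bool × Bool × Bool × Bool :=
  let (u, t, s, lo, f, o) := st
  if label == "USERNAME" then (true, t, s, lo, f, o)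
  else if PySem.Str.startswith label "#" then (u, true, s, lo, f, o)
  else if label == "BIO_TOO_SHORT" then (u, t, true, lo, f, o)
  else if label == "BIO_TOO_LONG" then (u, t, s, true, f, o)
  else if PySem.Str.startswith label "FORBIDDEN:" then (u, t, s, lo, true, o)
  else (u, t, s, lo, f, true)

def verify_fix_tips_py_alt (missing_labels : List String) (highrise_username : String) : String :=
  let (u, t, s, lo, f, o) :=
    missing_labels.foldl pvClassify (false, false, false, false, false, false)
  let tips : List String := []
  let tips := if u then tips ++ ["Add `" ++ highrise_username ++ "` exactly as written."] else tips
  let tips := if t then tips ++ ["Add the required tags to the bio."] else tips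
  let tips := if s then tips ++ ["Write a fuller bio so it clears the minimum length."] else tips
  let tips := if lo then tips ++ ["Trim the bio down before resubmitting."] else tips
  let tips := if f then tips ++ ["Remove blocked wording or patterns."] else tips
  let tips := if o then tips ++ ["Match the required formatting pattern for this server."] else tips
  let tips := if tips.isEmpty then tips ++ ["Double-check the bio text and try the command again."] else tips
  PySem.Str.join "\n" ((tips.take 4).map (fun tip => "- " ++ tip))

-- ===== PRECONDITION & SPEC =====
def Spec_verify_fix_tips_py (missing_labels : List String) (highrise_username : String) (out : String) : Prop := out = verify_fix_tips_py_alt missing_labels highrise_username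
instance (missing_labels : List String) (highrise_username : String) (out : String) : Decidable (Spec_verify_fix_tips_py missing_labels highrise_username out) := by unfold Spec_verify_fix_tips_py; infer_instance

-- ===== CLAIM (what is proved, stated in full; the proofs are below) =====
def Claim_equal_verify_fix_tips_py : Prop := ∀ (missing_labels : List String) (highrise_username : String), Dom_verify_fix_tips_py missing_labels highrise_username → Spec_verify_fix_tips_py missing_labels highrise_username (verify_fix_tips_py missing_labels highrise_username)

-- ===== LEMMAS AND PROOFS =====

-- A's membership tests as `any`
theorem contains_eq_any (mm : List String) (a : String) :
    mm.contains a = mm.any (fun l => l == a) := by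
  induction mm with
  | nil => rfl
  | cons x xs ih =>
    rw [List.contains_cons, List.any_cons, ih, Bool.beq_comm]

-- A's truthiness tests on filters as `any`
theorem filter_nonempty_eq_any (p : String → Bool) (mm : List String) :
    (!(mm.filter p).isEmpty) = mm.any p := by
  induction mm with
  | nil => rfl
  | cons x xs ih => by_cases h : p x = true <;> simp [h, ih]

-- the six simple predicates A scans for
def pU (l : String) : Bool := l == "USERNAME"
def pT (l : String) : Bool := PySem.Str.startswith l "#"
def pS (l : String) : Bool := l == "BIO_TOO_SHORT"
def pL (l : String) : Bool := l == "BIO_TOO_LONG"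
def pF (l : String) : Bool := PySem.Str.startswith l "FORBIDDEN:"
def pO (l : String) : Bool :=
  !(l == "BIO_TOO_SHORT" || l == "BIO_TOO_LONG" || l == "USERNAME")
  && !PySem.Str.startswith l "#" && !PySem.Str.startswith l "FORBIDDEN:"

-- a string cannot start with both '#' and "FORBIDDEN:"
theorem starts_disjoint (cs : List Char) (h : PySem.Chars.startswith cs ['#'] = true) :
    PySem.Chars.startswith cs ['F','O','R','B','I','D','D','E','N',':'] = false := by
  cases cs with
  | nil => simp [PySem.Chars.startswith] at h
  | cons c cs =>
    simp [PySem.Chars.startswith, List.isPrefixOf] at h ⊢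
    subst h
    intro hF; exact absurd hF (by decide)

theorem classify_spec (st : Bool × Bool × Bool × Bool × Bool × Bool) (a : String) :
    pvClassify st a =
      (st.1 || pU a, st.2.1 || pT a, st.2.2.1 || pS a, st.2.2.2.1 || pL a,
       st.2.2.2.2.1 || pF a, st.2.2.2.2.2 || pO a) := by
  obtain ⟨u, t, s, lo, f, o⟩ := st
  have eU1 : PySem.Chars.startswith ['U','S','E','R','N','A','M','E'] ['#'] = false := by decide
  have eU2 : PySem.Chars.startswith ['U','S','E','R','N','A','M','E'] ['F','O','R','B','I','D','D','E','N',':'] = false := by decide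
  have eS1 : PySem.Chars.startswith ['B','I','O','_','T','O','O','_','S','H','O','R','T'] ['#'] = false := by decide
  have eS2 : PySem.Chars.startswith ['B','I','O','_','T','O','O','_','S','H','O','R','T'] ['F','O','R','B','I','D','D','E','N',':'] = false := by decide
  have eL1 : PySem.Chars.startswith ['B','I','O','_','T','O','O','_','L','O','N','G'] ['#'] = false := by decide
  have eL2 : PySem.Chars.startswith ['B','I','O','_','T','O','O','_','L','O','N','G'] ['F','O','R','B','I','D','D','E','N',':'] = false := by decide
  by_cases h1 : a = "USERNAME"
  · subst h1; simp [pvClassify, pU, pT, pS, pL, pF, pO, eU1, eU2]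
  · by_cases h2 : PySem.Str.startswith a "#" = true
    · simp at h2
      have n3 : a ≠ "BIO_TOO_SHORT" := by rintro rfl; simp [eS1] at h2
      have n4 : a ≠ "BIO_TOO_LONG" := by rintro rfl; simp [eL1] at h2
      simp [pvClassify, pU, pT, pS, pL, pF, pO, h1, h2, n3, n4, starts_disjoint a.toList h2]
    · simp at h2
      by_cases h3 : a = "BIO_TOO_SHORT"
      · subst h3; simp [pvClassify, pU, pT, pS, pL, pF, pO, eS1, eS2]
      · by_cases h4 : a = "BIO_TOO_LONG"
        · subst h4; simp [pvClassify, pU, pT, pS, pL, pF, pO, eL1, eL2]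
        · by_cases h5 : PySem.Str.startswith a "FORBIDDEN:" = true
          · simp at h5
            simp [pvClassify, pU, pT, pS, pL, pF, pO, h1, h2, h3, h4, h5]
          · simp at h5
            simp [pvClassify, pU, pT, pS, pL, pF, pO, h1, h2, h3, h4, h5]

theorem fold_spec (mm : List String) (u t s lo f o : Bool) :
    mm.foldl pvClassify (u, t, s, lo, f, o) =
      (u || mm.any pU, t || mm.any pT, s || mm.any pS,
       lo || mm.any pL, f || mm.any pF, o || mm.any pO) := by
  induction mm generalizing u t s lo f o with
  | nil => simp
  | cons a xs ih =>
      rw [List.foldl_cons, classify_spec]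
      simp only [ih, List.any_cons, Bool.or_assoc]

theorem verify_fix_tips_py_spec : Claim_equal_verify_fix_tips_py := by
  intro mm hu _
  show verify_fix_tips_py mm hu = verify_fix_tips_py_alt mm hu
  unfold verify_fix_tips_py verify_fix_tips_py_alt
  rw [fold_spec]
  simp only [contains_eq_any, filter_nonempty_eq_any, Bool.false_or]
  rfl
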